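-- pv_equiv track=rewrite | github.com/fgatto13/ThirdPartyWebsites_Analyzer | functions.py | get_core_domain
-- ===== SOURCE A (Python) =====
-- def get_core_domain(hostname: str) -> str | None:
--     if not hostname:
--         return None
--
--     ignore = {"com", "safeframe"}   # to reduce noise when filtering the domains
--     labels = [label.lower() for label in hostname.split(".") if label.lower() not in ignore]
--
--     if not labels:
--         return None
--
--     # the core domain is the rightmost meaningful label
--     return labels[-1]
-- ===== SOURCE B (Python) =====
-- def get_core_domain(hostname: str) -> str | None:
--     if not hostname:
--         return None
--     ignore = {"com", "safeframe"}
--     for label in reversed(hostname.split(".")):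
--         low = label.lower()
--         if low not in ignore:
--             return low
--     return None
-- ===== Notes on version B (the rewrite author's own statement) =====
-- stated objective: alternative
-- what changed: B scans the labels right-to-left with an early return of the first non-ignored lowercased label, instead of building the full filtered list and taking its last element.
import Mathlib
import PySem

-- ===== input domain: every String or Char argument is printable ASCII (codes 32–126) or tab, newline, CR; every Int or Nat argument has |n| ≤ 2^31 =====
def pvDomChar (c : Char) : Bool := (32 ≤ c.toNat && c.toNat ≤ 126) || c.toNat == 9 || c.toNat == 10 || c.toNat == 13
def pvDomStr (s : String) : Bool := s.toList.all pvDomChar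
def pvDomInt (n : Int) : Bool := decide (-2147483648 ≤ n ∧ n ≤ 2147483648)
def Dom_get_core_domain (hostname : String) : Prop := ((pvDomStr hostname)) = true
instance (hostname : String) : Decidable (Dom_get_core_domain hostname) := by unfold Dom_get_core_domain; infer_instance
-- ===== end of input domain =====

-- B replaces A's filtered-list-then-last-element construction with a right-to-left scan
-- that returns the first non-ignored lowercased label (alternative decomposition).


-- ===== PORT A =====
def get_core_domain (hostname : String) : Option String :=
  if hostname == "" then none
  else
    let ignore : List String := ["com", "safeframe"]
    let labels := ((PySem.Str.split? hostname ".").getD []).filterMap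
      (fun label => if ignore.contains (PySem.Str.lower label) then none
                    else some (PySem.Str.lower label))
    if labels == [] then none
    else PySem.List.pyGet? labels (-1)

-- ===== PORT B =====
-- loop 'for label in reversed(...)' with early return
def gcdLoop : List String → Option String
  | [] => none
  | label :: rest =>
      let low := PySem.Str.lower label
      if (["com", "safeframe"] : List String).contains low then gcdLoop rest
      else some low

def get_core_domain_alt (hostname : String) : Option String :=
  if hostname == "" then none
  else gcdLoop ((PySem.Str.split? hostname ".").getD []).reverse

-- ===== PRECONDITION & SPEC =====
def Spec_get_core_domain (hostname : String) (out : Option String) : Prop := out = get_core_domain_alt hostname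
instance (hostname : String) (out : Option String) : Decidable (Spec_get_core_domain hostname out) := by unfold Spec_get_core_domain; infer_instance

-- ===== CLAIM (what is proved, stated in full; the proofs are below) =====
def Claim_equal_get_core_domain : Prop := ∀ (hostname : String), Dom_get_core_domain hostname → Spec_get_core_domain hostname (get_core_domain hostname)

-- ===== LEMMAS AND PROOFS =====
theorem gcdLoop_reverse (f : String → Option String)
    (hf : ∀ l, f l = if (["com", "safeframe"] : List String).contains (PySem.Str.lower l) then none
                     else some (PySem.Str.lower l)) :
    ∀ xs : List String, gcdLoop xs.reverse = (xs.filterMap f).getLast? := by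
  intro xs
  induction xs using List.reverseRecOn with
  | nil => simp [gcdLoop]
  | append_singleton ys a ih =>
      rw [List.reverse_append]
      simp only [List.reverse_singleton, List.singleton_append, gcdLoop, List.filterMap_append,
        List.filterMap_cons, List.filterMap_nil, hf a]
      split
      · simpa using ih
      · simp

theorem get_core_domain_spec : Claim_equal_get_core_domain := by
  intro hostname _
  unfold Spec_get_core_domain get_core_domain get_core_domain_alt
  by_cases h : hostname == ""
  · simp [h]
  · simp only [h]
    rw [gcdLoop_reverse (fun label => if (["com", "safeframe"] : List String).contains (PySem.Str.lower label) then none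
                    else some (PySem.Str.lower label)) (fun _ => rfl)]
    set labels := ((PySem.Str.split? hostname ".").getD []).filterMap _ with hl
    by_cases he : labels = []
    · simp [he]
    · simp [he, PySem.List.pyGet?_neg_one]
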